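-- pv_equiv track=rewrite | github.com/raeez/chiral-bar-cobar | compute/lib/cy_elliptic_chiral_engine.py | theta_Z_squared
-- ===== SOURCE A (Python) =====
-- import math
-- from typing import Any, Dict, List, Optional, Tuple
--
-- def theta_Z_squared(nmax: int = 30) -> List[int]:
--     r"""Theta function of the square lattice Z^2 (Gaussian integers, tau=i).
--
--     Theta_{Z^2}(tau') = sum_{(m,n) in Z^2} q'^{(m^2 + n^2)/2}
--
--     For the STANDARD embedding Z + iZ in C with norm |z|^2:
--     ||m + ni||^2 = m^2 + n^2.
--
--     With the convention that the lattice theta function uses q'^{||v||^2/2}: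
--       Theta(tau') = sum_{m,n} q'^{(m^2+n^2)/2}
--       = (sum_m q'^{m^2/2})^2 = theta_3(tau'/2)^2
--
--     But we can also write it with integer exponents if we use the
--     bilinear form <v,w> = Re(v * wbar) = m1*m2 + n1*n2 (standard Euclidean).
--     The Gram matrix is the identity I_2.
--
--     Returns c[k] = #{(m,n) in Z^2 : m^2 + n^2 = 2k} (for half-integer convention)
--     OR c[k] = #{(m,n) : m^2 + n^2 = k} (for integer convention).
--
--     We use the STANDARD convention: Theta = sum r_2(k) q^k where
--     r_2(k) = #{(m,n) in Z^2 : m^2 + n^2 = k}.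
--     """
--     coeffs = [0] * nmax
--     bound = int(math.isqrt(nmax)) + 1
--     for m in range(-bound, bound + 1):
--         for n_val in range(-bound, bound + 1):
--             k = m * m + n_val * n_val
--             if 0 <= k < nmax:
--                 coeffs[k] += 1
--     return coeffs
-- ===== SOURCE B (Python) =====
-- from typing import List
--
--
-- def theta_Z_squared(nmax: int = 30) -> List[int]:
--     """r_2 counts via theta_3 squared: build the 1-D table s with s[j] = #{m : m*m == j},
--     then square the (sparse) series: out[a+b] += s[a]*s[b] over nonzero positions."""
--     s = [0] * nmax
--     if nmax > 0:
--         s[0] = 1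
--     m = 1
--     while m * m < nmax:
--         s[m * m] += 2
--         m += 1
--     nz = [j for j in range(nmax) if s[j] != 0]
--     out = [0] * nmax
--     for a in nz:
--         for b in nz:
--             if a + b < nmax:
--                 out[a + b] += s[a] * s[b]
--     return out
-- ===== Notes on version B (the rewrite author's own statement) =====
-- stated objective: alternative
-- what changed: B replaces A's enumeration of the two-dimensional lattice square (every (m,n) pair with a range test and an increment) by a one-dimensional table of square counts (theta_3 coefficients) followed by a sparse self-convolution over the nonzero positions of that table.
import Mathlib
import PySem

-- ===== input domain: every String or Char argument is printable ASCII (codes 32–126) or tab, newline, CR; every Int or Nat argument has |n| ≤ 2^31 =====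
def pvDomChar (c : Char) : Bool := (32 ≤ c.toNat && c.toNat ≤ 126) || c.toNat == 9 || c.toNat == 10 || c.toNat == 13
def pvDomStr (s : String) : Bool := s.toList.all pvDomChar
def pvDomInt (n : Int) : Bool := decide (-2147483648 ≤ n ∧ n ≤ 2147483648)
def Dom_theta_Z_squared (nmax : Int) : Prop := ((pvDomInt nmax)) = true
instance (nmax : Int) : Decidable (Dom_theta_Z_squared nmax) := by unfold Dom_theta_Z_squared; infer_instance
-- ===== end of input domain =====

-- B replaces A's 2-D lattice enumeration by a 1-D square-count table convolved with itself (alternative algorithm, same values).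

-- ===== PORT A =====
-- math.isqrt(nmax) is Nat.sqrt nmax.toNat — exact for nmax ≥ 0 (Pre_ excludes nmax < 0, where Python raises ValueError)
def theta_Z_squared (nmax : Int) : List Int :=
  let coeffs := List.replicate nmax.toNat (0 : Int)
  let bound : Int := ((Nat.sqrt nmax.toNat : Nat) : Int) + 1
  (PySem.List.pyRange (-bound) (bound + 1) 1).foldl
    (fun coeffs m =>
      (PySem.List.pyRange (-bound) (bound + 1) 1).foldl
        (fun coeffs n_val =>
          let k := m * m + n_val * n_val
          if 0 ≤ k ∧ k < nmax then coeffs.modify k.toNat (· + 1) else coeffs)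
        coeffs)
    coeffs

-- ===== PORT B =====
-- the 'while m * m < nmax: s[m*m] += 2; m += 1' loop of Source B
def thetaAltWhile (n : Nat) (s : List Int) (m : Nat) : List Int :=
  if m * m < n then thetaAltWhile n (s.modify (m * m) (· + 2)) (m + 1) else s
  termination_by n - m
  decreasing_by
    rename_i h
    rcases Nat.eq_zero_or_pos m with h0 | h0
    · subst h0; simp only [Nat.mul_zero] at h; omega
    · have := Nat.le_mul_of_pos_left m h0
      omega

-- s.getD j 0 ports Python's s[j]: every index used (j < nmax = len(s)) is in range, so getD is exact
def theta_Z_squared_alt (nmax : Int) : List Int :=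
  let n := nmax.toNat
  let s0 := List.replicate n (0 : Int)
  let s1 := if 0 < n then s0.set 0 1 else s0   -- 'if nmax > 0: s[0] = 1'
  let s := thetaAltWhile n s1 1
  let nz := (List.range n).filter (fun j => !(s.getD j 0 == 0))   -- [j for j in range(nmax) if s[j] != 0]
  let out := List.replicate n (0 : Int)
  nz.foldl (fun out a =>
    nz.foldl (fun out b =>
      if a + b < n then out.modify (a + b) (· + s.getD a 0 * s.getD b 0) else out) out) out

-- ===== PRECONDITION & SPEC =====
-- Pre_ excludes exactly nmax < 0, where A's math.isqrt raises ValueError.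
def Pre_theta_Z_squared (nmax : Int) : Prop := 0 ≤ nmax
instance (nmax : Int) : Decidable (Pre_theta_Z_squared nmax) := by unfold Pre_theta_Z_squared; infer_instance
def pvWitness_theta_Z_squared : Int := 6

def Spec_theta_Z_squared (nmax : Int) (out : List Int) : Prop := out = theta_Z_squared_alt nmax
instance (nmax : Int) (out : List Int) : Decidable (Spec_theta_Z_squared nmax out) := by unfold Spec_theta_Z_squared; infer_instance

-- ===== CLAIM (what is proved, stated in full; the proofs are below) =====
def Claim_equal_theta_Z_squared : Prop := ∀ (nmax : Int), Dom_theta_Z_squared nmax → Pre_theta_Z_squared nmax → Spec_theta_Z_squared nmax (theta_Z_squared nmax)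

-- ===== LEMMAS AND PROOFS =====

-- number of m ∈ ℤ with m*m = i: 1 for i = 0, 2 for a positive square, 0 otherwise
def sqCnt (i : Nat) : Int := if i = 0 then 1 else if Nat.sqrt i * Nat.sqrt i = i then 2 else 0

-- the body of A's inner loop, with the exponent as an explicit argument
def bump (nmax : Int) (c : List Int) (k : Int) : List Int :=
  if 0 ≤ k ∧ k < nmax then c.modify k.toNat (· + 1) else c

lemma bump_length (nmax : Int) (c : List Int) (k : Int) : (bump nmax c k).length = c.length := by
  unfold bump; split <;> simp [List.length_modify]

lemma foldl_bump_length (nmax : Int) (L : List Int) : ∀ c : List Int,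
    (L.foldl (bump nmax) c).length = c.length := by
  induction L with
  | nil => intro c; rfl
  | cons a L ih => intro c; rw [List.foldl_cons, ih, bump_length]

lemma foldl_bump_getD (nmax : Int) (L : List Int) : ∀ (c : List Int) (j : Nat),
    (j : Int) < nmax → j < c.length →
    (L.foldl (bump nmax) c).getD j 0 = c.getD j 0 + (L.countP (fun k => k == (j : Int)) : Int) := by
  induction L with
  | nil => intro c j _ _; simp
  | cons a L ih =>
    intro c j hj hjc
    rw [List.foldl_cons, ih _ j hj (by rw [bump_length]; exact hjc), List.countP_cons]
    have hb : (bump nmax c a).getD j 0 = c.getD j 0 + (if a == (j : Int) then (1:Int) else 0) := by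
      unfold bump
      by_cases ha : a = (j : Int)
      · subst ha
        rw [if_pos ⟨Int.natCast_nonneg j, hj⟩]
        rw [List.getD_eq_getElem _ 0 (by simpa using hjc),
            List.getD_eq_getElem _ 0 hjc, List.getElem_modify]
        simp
      · simp only [beq_iff_eq, ha, if_false, add_zero]
        split
        · rename_i hcond
          rw [List.getD_eq_getElem _ 0 (by simpa using hjc), List.getD_eq_getElem _ 0 hjc,
              List.getElem_modify, if_neg (by omega)]
        · rfl
    rw [hb]
    push_cast
    split <;> ring

lemma inner_as_bumpfold (nmax : Int) (R : List Int) (m : Int) (c : List Int) :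
    R.foldl (fun c n => bump nmax c (m * m + n * n)) c
      = (R.map (fun n => m * m + n * n)).foldl (bump nmax) c := by
  rw [List.foldl_map]

lemma outer_fold_length (nmax : Int) (R L : List Int) : ∀ c : List Int,
    (L.foldl (fun c m => R.foldl (fun c n => bump nmax c (m * m + n * n)) c) c).length = c.length := by
  induction L with
  | nil => intro c; rfl
  | cons a L ih =>
    intro c
    rw [List.foldl_cons, ih, inner_as_bumpfold, foldl_bump_length]

lemma outer_fold_getD (nmax : Int) (R L : List Int) : ∀ (c : List Int) (j : Nat),
    (j : Int) < nmax → j < c.length →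
    (L.foldl (fun c m => R.foldl (fun c n => bump nmax c (m * m + n * n)) c) c).getD j 0
      = c.getD j 0 + (L.map (fun m => (R.countP (fun n => m * m + n * n == (j : Int)) : Int))).sum := by
  induction L with
  | nil => intro c j _ _; simp
  | cons a L ih =>
    intro c j hj hjc
    set c1 := R.foldl (fun c n => bump nmax c (a * a + n * n)) c with hc1
    have hlen : c1.length = c.length := by
      rw [hc1, inner_as_bumpfold, foldl_bump_length]
    rw [List.foldl_cons, ih c1 j hj (hlen ▸ hjc)]
    have h1 : c1.getD j 0 = c.getD j 0 + (R.countP (fun n => a * a + n * n == (j : Int)) : Int) := by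
      rw [hc1, inner_as_bumpfold, foldl_bump_getD nmax _ c j hj hjc, List.countP_map]
      rfl
    rw [h1, List.map_cons, List.sum_cons]
    ring

-- count of n in [-B..B] with n*n = c
lemma count_sq (B c : Nat) :
    (PySem.List.pyRange (-(B : Int)) ((B : Int) + 1) 1).countP (fun x => x * x == (c : Int))
      = if c = 0 then 1 else if Nat.sqrt c * Nat.sqrt c = c ∧ Nat.sqrt c ≤ B then 2 else 0 := by
  induction B with
  | zero =>
    simp only [Nat.cast_zero, neg_zero]
    rw [PySem.List.pyRange_one_singleton]
    by_cases hc : c = 0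
    · subst hc; simp
    · have hind : ((0 : Int) * 0 == (c : Int)) = false := by
        simp; omega
      simp only [List.countP_cons, List.countP_nil, hc, if_false, hind, Bool.false_eq_true]
      rw [if_neg (fun h => by obtain ⟨h1, h2⟩ := h
                              have h0 : Nat.sqrt c = 0 := by omega
                              rw [h0] at h1; omega)]
  | succ B ih =>
    rw [show (-(((B + 1) : Nat) : Int)) = -((B : Int) + 1) by push_cast; ring,
        show ((((B + 1) : Nat) : Int) + 1) = ((B : Int) + 1) + 1 by push_cast; ring]
    rw [PySem.List.pyRange_one_cons (by omega : -((B : Int) + 1) < (B : Int) + 1 + 1),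
        show (-((B : Int) + 1) + 1) = -(B : Int) by ring,
        PySem.List.pyRange_one_succ_right (by omega : -(B : Int) ≤ (B : Int) + 1),
        List.countP_cons, List.countP_append, List.countP_cons, List.countP_nil, ih]
    by_cases hq : (B + 1) * (B + 1) = c
    · have hc0 : c ≠ 0 := by rw [← hq]; exact (Nat.mul_pos (Nat.succ_pos B) (Nat.succ_pos B)).ne'
      have hsq : Nat.sqrt c = B + 1 := by
        rw [← hq, show (B+1)*(B+1) = (B+1)^2 by ring, Nat.sqrt_eq']
      have hind1 : (((B : Int) + 1) * ((B : Int) + 1) == (c : Int)) = true := by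
        simp only [beq_iff_eq]
        exact_mod_cast congrArg (Nat.cast (R := Int)) hq
      have hind2 : ((-((B : Int) + 1)) * (-((B : Int) + 1)) == (c : Int)) = true := by
        rw [show (-((B : Int) + 1)) * (-((B : Int) + 1)) = ((B : Int) + 1) * ((B : Int) + 1) by ring, hind1]
      rw [hind1, hind2]
      simp only [hc0, if_false, if_true, hsq]
      rw [if_neg (fun h => absurd h.2 (by omega : ¬ (B + 1 ≤ B))), if_pos ⟨hq, le_refl _⟩]
    · have hind1 : (((B : Int) + 1) * ((B : Int) + 1) == (c : Int)) = false := by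
        rw [beq_eq_false_iff_ne]
        intro h; exact hq (by exact_mod_cast h)
      have hind2 : ((-((B : Int) + 1)) * (-((B : Int) + 1)) == (c : Int)) = false := by
        rw [show (-((B : Int) + 1)) * (-((B : Int) + 1)) = ((B : Int) + 1) * ((B : Int) + 1) by ring, hind1]
      rw [hind1, hind2]
      simp only [Bool.false_eq_true, if_false, add_zero]
      by_cases hc : c = 0
      · simp [hc]
      · simp only [hc, if_false]
        by_cases hcond : Nat.sqrt c * Nat.sqrt c = c ∧ Nat.sqrt c ≤ B
        · rw [if_pos hcond, if_pos ⟨hcond.1, by omega⟩]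
        · rw [if_neg hcond, if_neg (fun h => by
            obtain ⟨h1, h2⟩ := h
            have hB : Nat.sqrt c = B + 1 := by
              rcases Nat.lt_or_ge (Nat.sqrt c) (B + 1) with hlt | hge
              · exact absurd ⟨h1, by omega⟩ hcond
              · omega
            rw [hB] at h1
            exact hq h1)]

-- group a sum of f(m*m) over a list by the value of m*m
lemma group_sum (j : Nat) (f : Nat → Int) (hf : ∀ t, j < t → f t = 0) (L : List Int) :
    (L.map (fun m => f (m * m).toNat)).sum
      = ∑ i ∈ Finset.range (j + 1), (L.countP (fun m => (m * m).toNat == i) : Int) * f i := by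
  induction L with
  | nil => simp
  | cons a L ih =>
    rw [List.map_cons, List.sum_cons, ih]
    have hsplit : ∀ i : Nat, ((List.countP (fun m => (m * m).toNat == i) (a :: L) : Nat) : Int) * f i
        = (List.countP (fun m => (m * m).toNat == i) L : Int) * f i
          + (if (a * a).toNat = i then f i else 0) := by
      intro i
      rw [List.countP_cons]
      by_cases h : (a * a).toNat = i
      · simp [h]; ring
      · simp [h]
    rw [Finset.sum_congr rfl (fun i _ => hsplit i), Finset.sum_add_distrib,
        Finset.sum_ite_eq (Finset.range (j + 1)) ((a * a).toNat) f]
    by_cases hm : (a * a).toNat ∈ Finset.range (j + 1)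
    · rw [if_pos hm]; ring
    · rw [if_neg hm, hf ((a * a).toNat) (by simpa using hm)]; ring

lemma sum_map_range_eq_finset (n : Nat) (f : Nat → Int) :
    ((List.range n).map f).sum = ∑ i ∈ Finset.range n, f i := by
  induction n with
  | zero => simp
  | succ n ih => rw [List.range_succ, Finset.sum_range_succ, List.map_append]; simp [ih]

lemma thetaAltWhile_getD : ∀ (n : Nat) (s : List Int) (m : Nat), 0 < m → s.length = n →
    ∀ i, i < n →
    (thetaAltWhile n s m).getD i 0
      = s.getD i 0 + (if m ≤ Nat.sqrt i ∧ Nat.sqrt i * Nat.sqrt i = i then 2 else 0) := by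
  intro n s m
  induction s, m using thetaAltWhile.induct n with
  | case1 s m h ih =>
    intro hm hlen i hi
    rw [thetaAltWhile, if_pos h, ih (by omega) (by rw [List.length_modify]; exact hlen) i hi]
    have hmod : (s.modify (m * m) (· + 2)).getD i 0
        = s.getD i 0 + (if m * m = i then 2 else 0) := by
      rw [List.getD_eq_getElem _ 0 (by rw [List.length_modify]; omega),
          List.getD_eq_getElem _ 0 (by omega), List.getElem_modify]
      split <;> simp
    rw [hmod]
    by_cases he : i = m * m
    · subst he
      have hs : Nat.sqrt (m * m) = m := by
        rw [show m * m = m ^ 2 by ring, Nat.sqrt_eq']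
      rw [if_pos rfl, if_neg (by rw [hs]; omega), if_pos ⟨by rw [hs], by rw [hs]⟩]
      ring
    · rw [if_neg (fun hh => he hh.symm)]
      by_cases hc : Nat.sqrt i * Nat.sqrt i = i
      · by_cases hle : m + 1 ≤ Nat.sqrt i
        · rw [if_pos ⟨hle, hc⟩, if_pos ⟨by omega, hc⟩]
          ring
        · rw [if_neg (fun hh => hle hh.1)]
          have hnot : ¬ m ≤ Nat.sqrt i := by
            intro hm2
            have hmi : Nat.sqrt i = m := by omega
            rw [hmi] at hc
            exact he hc.symm
          rw [if_neg (fun hh => hnot hh.1)]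
          ring
      · rw [if_neg (fun hh => hc hh.2), if_neg (fun hh => hc hh.2)]
        ring
  | case2 s m h =>
    intro hm hlen i hi
    rw [thetaAltWhile, if_neg h]
    rw [if_neg (fun hh => by
      obtain ⟨h1, h2⟩ := hh
      have : m * m ≤ Nat.sqrt i * Nat.sqrt i := Nat.mul_le_mul h1 h1
      omega), add_zero]

-- the finished table s has entry sqCnt i at every i < n
lemma s_table_getD (n : Nat) (i : Nat) (hi : i < n) :
    (thetaAltWhile n (if 0 < n then (List.replicate n (0 : Int)).set 0 1 else List.replicate n 0) 1).getD i 0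
      = sqCnt i := by
  have hn : 0 < n := by omega
  rw [if_pos hn]
  rw [thetaAltWhile_getD n _ 1 (by omega) (by simp) i hi]
  have hs1 : ((List.replicate n (0 : Int)).set 0 1).getD i 0 = if i = 0 then 1 else 0 := by
    rw [List.getD_eq_getElem _ 0 (by simpa using hi), List.getElem_set]
    split
    · rw [if_pos (by omega)]
    · rw [if_neg (by omega), List.getElem_replicate]
  rw [hs1]
  unfold sqCnt
  by_cases h0 : i = 0
  · subst h0
    simp [Nat.sqrt_zero]
  · simp only [h0, if_false]
    by_cases hc : Nat.sqrt i * Nat.sqrt i = i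
    · have h1 : 1 ≤ Nat.sqrt i := by
        rcases Nat.eq_zero_or_pos (Nat.sqrt i) with hz | hp
        · rw [hz] at hc; omega
        · omega
      rw [if_pos ⟨h1, hc⟩, if_pos hc]
      ring
    · rw [if_neg (fun hh => hc hh.2), if_neg hc]
      ring

-- pointwise value of A's output
lemma A_getD (nmax : Int) (hn : 0 ≤ nmax) (j : Nat) (hj : j < nmax.toNat) :
    (theta_Z_squared nmax).getD j 0
      = ∑ i ∈ Finset.range (j + 1), sqCnt i * sqCnt (j - i) := by
  have hA : theta_Z_squared nmax =
      (PySem.List.pyRange (-(((Nat.sqrt nmax.toNat : Nat) : Int) + 1)) ((((Nat.sqrt nmax.toNat : Nat) : Int) + 1) + 1) 1).foldl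
        (fun c m =>
          (PySem.List.pyRange (-(((Nat.sqrt nmax.toNat : Nat) : Int) + 1)) ((((Nat.sqrt nmax.toNat : Nat) : Int) + 1) + 1) 1).foldl
            (fun c n => bump nmax c (m * m + n * n)) c)
        (List.replicate nmax.toNat 0) := rfl
  set R := PySem.List.pyRange (-(((Nat.sqrt nmax.toNat : Nat) : Int) + 1)) ((((Nat.sqrt nmax.toNat : Nat) : Int) + 1) + 1) 1 with hR
  have hRcast : R = PySem.List.pyRange (-((((Nat.sqrt nmax.toNat + 1) : Nat) : Int))) ((((Nat.sqrt nmax.toNat + 1) : Nat) : Int) + 1) 1 := by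
    rw [hR]; norm_cast
  have hcnt : ∀ t : Nat, t < nmax.toNat →
      ((R.countP (fun x => x * x == (t : Int)) : Nat) : Int) = sqCnt t := by
    intro t ht
    rw [hRcast, count_sq (Nat.sqrt nmax.toNat + 1) t]
    have hle : Nat.sqrt t ≤ Nat.sqrt nmax.toNat + 1 :=
      le_trans (Nat.sqrt_le_sqrt (Nat.le_of_lt ht)) (Nat.le_succ _)
    unfold sqCnt
    by_cases h0 : t = 0
    · simp [h0]
    · simp only [h0, if_false]
      by_cases hc : Nat.sqrt t * Nat.sqrt t = t
      · rw [if_pos ⟨hc, hle⟩, if_pos hc]; rfl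
      · rw [if_neg (fun hh => hc hh.1), if_neg hc]; rfl
  set f : Nat → Int := fun i => if i ≤ j then ((R.countP (fun x => x * x == ((j - i : Nat) : Int)) : Nat) : Int) else 0 with hfdef
  have hf0 : ∀ t, j < t → f t = 0 := by
    intro t ht; rw [hfdef]; exact if_neg (by omega)
  have hper : ∀ m : Int,
      ((R.countP (fun n => m * m + n * n == (j : Int)) : Nat) : Int) = f (m * m).toNat := by
    intro m
    have hmm : 0 ≤ m * m := mul_self_nonneg m
    by_cases hm2 : (m * m).toNat ≤ j
    · have hcongr : List.countP (fun n => m * m + n * n == (j : Int)) R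
          = List.countP (fun x => x * x == ((j - (m * m).toNat : Nat) : Int)) R := by
        apply List.countP_congr
        intro n _
        simp only [beq_iff_eq]
        have hnn : 0 ≤ n * n := mul_self_nonneg n
        constructor <;> intro hh <;> omega
      rw [hfdef]
      simp only [if_pos hm2]
      rw [hcongr]
    · rw [hfdef]
      simp only [if_neg hm2]
      rw [Nat.cast_eq_zero, List.countP_eq_zero]
      intro n _
      simp only [beq_iff_eq]
      have hnn : 0 ≤ n * n := mul_self_nonneg n
      omega
  rw [hA, outer_fold_getD nmax R R _ j (by omega) (by simpa using hj),
      List.getD_replicate _ hj, zero_add]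
  rw [List.map_congr_left (fun m _ => hper m), group_sum j f hf0 R]
  apply Finset.sum_congr rfl
  intro i hi
  have hij : i ≤ j := by simpa [Nat.lt_succ_iff] using hi
  have hcP : List.countP (fun m => (m * m).toNat == i) R
      = List.countP (fun x => x * x == (i : Int)) R := by
    apply List.countP_congr
    intro m _
    simp only [beq_iff_eq]
    have hmm : 0 ≤ m * m := mul_self_nonneg m
    constructor <;> intro hh <;> omega
  rw [hcP]
  rw [hfdef]
  simp only [if_pos hij]
  rw [hcnt i (by omega), hcnt (j - i) (by omega)]


-- generic single loop of B: guarded increment at f b with weight w b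
lemma foldl_inc_length (n : Nat) (f : Nat → Nat) (w : Nat → Int) (L : List Nat) :
    ∀ out : List Int,
    (L.foldl (fun out b => if f b < n then out.modify (f b) (· + w b) else out) out).length
      = out.length := by
  induction L with
  | nil => intro out; rfl
  | cons b L ih =>
    intro out
    rw [List.foldl_cons, ih]
    split <;> simp [List.length_modify]

lemma foldl_inc_getD (n : Nat) (f : Nat → Nat) (w : Nat → Int) (L : List Nat) :
    ∀ (out : List Int) (k : Nat), k < n → out.length = n →
    (L.foldl (fun out b => if f b < n then out.modify (f b) (· + w b) else out) out).getD k 0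
      = out.getD k 0 + (L.map (fun b => if f b = k then w b else 0)).sum := by
  induction L with
  | nil => intro out k _ _; simp
  | cons b L ih =>
    intro out k hk hlen
    rw [List.foldl_cons, ih _ k hk (by split <;> simp [List.length_modify, hlen]),
        List.map_cons, List.sum_cons]
    have hstep : (if f b < n then out.modify (f b) (· + w b) else out).getD k 0
        = out.getD k 0 + (if f b = k then w b else 0) := by
      by_cases hfb : f b = k
      · rw [if_pos (hfb ▸ hk), if_pos hfb,
            List.getD_eq_getElem _ 0 (by simp [List.length_modify]; omega),
            List.getD_eq_getElem _ 0 (by omega), List.getElem_modify, if_pos hfb]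
      · rw [if_neg hfb, add_zero]
        split
        · rw [List.getD_eq_getElem _ 0 (by simp [List.length_modify]; omega),
              List.getD_eq_getElem _ 0 (by omega), List.getElem_modify, if_neg hfb]
        · rfl
    rw [hstep]
    ring

-- outer loop of B: for a in nz: for b in nz: ...
lemma outer_inc_length (n : Nat) (s : List Int) (nz : List Nat) (L : List Nat) :
    ∀ out : List Int,
    (L.foldl (fun out a =>
        nz.foldl (fun out b =>
          if a + b < n then out.modify (a + b) (· + s.getD a 0 * s.getD b 0) else out) out) out).length
      = out.length := by
  induction L with
  | nil => intro out; rfl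
  | cons a L ih =>
    intro out
    rw [List.foldl_cons, ih, foldl_inc_length n (fun b => a + b) (fun b => s.getD a 0 * s.getD b 0)]

lemma outer_inc_getD (n : Nat) (s : List Int) (nz : List Nat) (L : List Nat) :
    ∀ (out : List Int) (k : Nat), k < n → out.length = n →
    (L.foldl (fun out a =>
        nz.foldl (fun out b =>
          if a + b < n then out.modify (a + b) (· + s.getD a 0 * s.getD b 0) else out) out) out).getD k 0
      = out.getD k 0
        + (L.map (fun a => (nz.map (fun b => if a + b = k then s.getD a 0 * s.getD b 0 else 0)).sum)).sum := by
  induction L with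
  | nil => intro out k _ _; simp
  | cons a L ih =>
    intro out k hk hlen
    rw [List.foldl_cons,
        ih _ k hk (by rw [foldl_inc_length n (fun b => a + b) (fun b => s.getD a 0 * s.getD b 0)]; exact hlen),
        foldl_inc_getD n (fun b => a + b) (fun b => s.getD a 0 * s.getD b 0) nz out k hk hlen,
        List.map_cons, List.sum_cons]
    ring

-- a sum over a filtered list equals the sum over the full list when dropped terms vanish
lemma sum_filter_eq_sum (L : List Nat) (p : Nat → Bool) (g : Nat → Int)
    (h : ∀ j ∈ L, p j = false → g j = 0) :
    ((L.filter p).map g).sum = (L.map g).sum := by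
  induction L with
  | nil => rfl
  | cons a L ih =>
    rw [List.filter_cons, List.map_cons, List.sum_cons]
    by_cases hp : p a = true
    · rw [if_pos hp, List.map_cons, List.sum_cons, ih (fun j hj => h j (List.mem_cons_of_mem a hj))]
    · rw [if_neg hp, ih (fun j hj => h j (List.mem_cons_of_mem a hj)),
          h a (List.mem_cons_self) (by simpa using hp), zero_add]

-- the inner delta-sum picks out b = k - a
lemma sum_range_delta (n k a : Nat) (hk : k < n) (h : Nat → Int) :
    ((List.range n).map (fun b => if a + b = k then h b else 0)).sum
      = if a ≤ k then h (k - a) else 0 := by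
  by_cases ha : a ≤ k
  · rw [if_pos ha]
    have hcongr : ∀ b ∈ List.range n, (if a + b = k then h b else 0) = (if k - a = b then h b else 0) := by
      intro b _
      by_cases hb : a + b = k
      · rw [if_pos hb, if_pos (by omega)]
      · rw [if_neg hb, if_neg (by omega)]
    rw [List.map_congr_left hcongr,
        sum_map_range_eq_finset n (fun b => if k - a = b then h b else 0),
        Finset.sum_ite_eq (Finset.range n) (k - a) h,
        if_pos (Finset.mem_range.mpr (by omega))]
  · rw [if_neg ha]
    have hcongr : ∀ b ∈ List.range n, (if a + b = k then h b else 0) = (0 : Int) := by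
      intro b _
      rw [if_neg (by omega)]
    rw [List.map_congr_left hcongr]
    simp

-- pointwise value of B's output
lemma B_getD (nmax : Int) (k : Nat) (hk : k < nmax.toNat) :
    (theta_Z_squared_alt nmax).getD k 0
      = ∑ i ∈ Finset.range (k + 1), sqCnt i * sqCnt (k - i) := by
  set N := nmax.toNat with hN
  set S := thetaAltWhile N
      (if 0 < N then (List.replicate N (0 : Int)).set 0 1 else List.replicate N 0) 1 with hS
  set nz := (List.range N).filter (fun j => !(S.getD j 0 == 0)) with hnz
  have hB : theta_Z_squared_alt nmax =
      nz.foldl (fun out a =>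
        nz.foldl (fun out b =>
          if a + b < N then out.modify (a + b) (· + S.getD a 0 * S.getD b 0) else out) out)
        (List.replicate N (0 : Int)) := rfl
  rw [hB, outer_inc_getD N S nz nz _ k hk (by simp), List.getD_replicate _ hk, zero_add]
  have hinner : ∀ a : Nat,
      (nz.map (fun b => if a + b = k then S.getD a 0 * S.getD b 0 else 0)).sum
        = if a ≤ k then S.getD a 0 * S.getD (k - a) 0 else 0 := by
    intro a
    rw [hnz, sum_filter_eq_sum _ _ _ (fun j _ hj => by
      have hj0 : S.getD j 0 = 0 := by simpa using hj
      split
      · rw [hj0, mul_zero]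
      · rfl),
      sum_range_delta N k a hk (fun b => S.getD a 0 * S.getD b 0)]
  rw [List.map_congr_left (fun a _ => hinner a), hnz,
      sum_filter_eq_sum _ _ _ (fun j _ hj => by
        have hj0 : S.getD j 0 = 0 := by simpa using hj
        split
        · rw [hj0, zero_mul]
        · rfl),
      sum_map_range_eq_finset N (fun a => if a ≤ k then S.getD a 0 * S.getD (k - a) 0 else 0)]
  rw [← Finset.sum_subset (by intro x hx; simp only [Finset.mem_range] at hx ⊢; omega :
        Finset.range (k + 1) ⊆ Finset.range N)
      (fun a _ ha => by rw [if_neg (by simpa [Nat.lt_succ_iff] using ha)])]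
  apply Finset.sum_congr rfl
  intro a ha
  have hak : a ≤ k := by simpa [Nat.lt_succ_iff] using ha
  rw [if_pos hak, hS, s_table_getD N a (by omega), s_table_getD N (k - a) (by omega)]

lemma A_length (nmax : Int) : (theta_Z_squared nmax).length = nmax.toNat := by
  have hA : theta_Z_squared nmax =
      (PySem.List.pyRange (-(((Nat.sqrt nmax.toNat : Nat) : Int) + 1)) ((((Nat.sqrt nmax.toNat : Nat) : Int) + 1) + 1) 1).foldl
        (fun c m =>
          (PySem.List.pyRange (-(((Nat.sqrt nmax.toNat : Nat) : Int) + 1)) ((((Nat.sqrt nmax.toNat : Nat) : Int) + 1) + 1) 1).foldl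
            (fun c n => bump nmax c (m * m + n * n)) c)
        (List.replicate nmax.toNat 0) := rfl
  rw [hA, outer_fold_length, List.length_replicate]

lemma B_length (nmax : Int) : (theta_Z_squared_alt nmax).length = nmax.toNat := by
  set N := nmax.toNat with hN
  set S := thetaAltWhile N
      (if 0 < N then (List.replicate N (0 : Int)).set 0 1 else List.replicate N 0) 1 with hS
  set nz := (List.range N).filter (fun j => !(S.getD j 0 == 0)) with hnz
  have hB : theta_Z_squared_alt nmax =
      nz.foldl (fun out a =>
        nz.foldl (fun out b =>
          if a + b < N then out.modify (a + b) (· + S.getD a 0 * S.getD b 0) else out) out)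
        (List.replicate N (0 : Int)) := rfl
  rw [hB, outer_inc_length, List.length_replicate]

-- ===== VERDICT (by name: the statement is the Claim_ definition above) =====
theorem theta_Z_squared_spec : Claim_equal_theta_Z_squared := by
  intro nmax _ hpre
  unfold Spec_theta_Z_squared
  apply List.ext_getElem
  · rw [A_length, B_length]
  · intro k hk hk'
    rw [← List.getD_eq_getElem _ 0 hk, ← List.getD_eq_getElem _ 0 hk']
    rw [A_getD nmax hpre k (by rwa [A_length] at hk), B_getD nmax k (by rwa [B_length] at hk')]
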